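-- pv_equiv track=rewrite | github.com/Kyungpyo-Kim/PythonApplication | CodingTest/baekjoon/pylint.py | solution
-- ===== SOURCE A (Python) =====
-- def solution(A: list) -> int:
--     """
--     solution
--
--     args:
--         A(list): array, within the range [0..100,000]
--                  each element of array  is an integer
--                  within the range [-2,147,483,648..2,147,483,647]
--
--     return:
--         int: number of inversions
--              -1 if number of inversions is larger than large_num
--
--     """
--     large_num = 1000000000
--     inversion = 0
--     sorted_arr = sorted(range(len(A)), key=lambda x: A[x])
--     for idx, origin in enumerate(sorted_arr):
--         if idx > origin:
--             inversion += idx - origin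
--             if inversion > large_num:
--                 return -1
--
--     return inversion
-- ===== SOURCE B (Python) =====
-- def solution(A: list) -> int:
--     """Inverse-permutation reformulation: total absolute displacement of sorted
--     ranks, halved, with a single final cap check (no running-cap early exit)."""
--     large_num = 1000000000
--     n = len(A)
--     order = sorted(range(n), key=lambda i: A[i])
--     rank = [0] * n
--     for i, p in enumerate(order):
--         rank[p] = i
--     total = sum(abs(i - r) for i, r in enumerate(rank)) // 2
--     return -1 if total > large_num else total
-- ===== Notes on version B (the rewrite author's own statement) =====
-- stated objective: alternative
-- what changed: B builds the inverse permutation (rank array) and computes the unconditional sum of absolute displacements halved, with one final cap test, instead of A's conditional positive-displacement accumulation over the sorted order with a running-cap early exit.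
import Mathlib
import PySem

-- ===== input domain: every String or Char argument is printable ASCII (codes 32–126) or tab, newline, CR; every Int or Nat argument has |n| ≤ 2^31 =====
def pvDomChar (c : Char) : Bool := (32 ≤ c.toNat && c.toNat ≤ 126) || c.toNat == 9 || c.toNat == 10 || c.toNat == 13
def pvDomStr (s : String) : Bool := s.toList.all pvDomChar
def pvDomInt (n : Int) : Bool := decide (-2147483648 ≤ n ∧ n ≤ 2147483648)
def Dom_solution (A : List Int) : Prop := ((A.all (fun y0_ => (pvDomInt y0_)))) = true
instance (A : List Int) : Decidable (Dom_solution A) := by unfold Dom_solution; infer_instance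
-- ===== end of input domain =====

-- B replaces A's conditional positive-displacement accumulation with a running cap by the
-- inverse permutation's total absolute displacement halved and a single final cap test
-- (alternative decomposition, same O(n log n) cost).

-- ===== PORT A =====
-- the loop 'for idx, origin in enumerate(sorted_arr): …' with early return -1
def solLoopA : List Int → Int → Int → Int
  | [], _, inversion => inversion
  | origin :: rest, idx, inversion =>
    if origin < idx then
      if 1000000000 < inversion + (idx - origin) then -1
      else solLoopA rest (idx + 1) (inversion + (idx - origin))
    else solLoopA rest (idx + 1) inversion

def solution (A : List Int) : Int :=
  solLoopA (PySem.List.sorted (PySem.List.pyRange 0 (A.length : Int)) (fun x => PySem.List.pyGetD A x 0)) 0 0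

-- ===== PORT B =====
-- 'for i, p in enumerate(order): rank[p] = i' — p is always a valid nonnegative index, so List.set is exact
def rankLoop : List Int → Int → List Int → List Int
  | [], _, rank => rank
  | p :: rest, i, rank => rankLoop rest (i + 1) (rank.set p.toNat i)

-- 'sum(abs(i - r) for i, r in enumerate(rank))'
def absSum : List Int → Int → Int
  | [], _ => 0
  | r :: rest, i => |i - r| + absSum rest (i + 1)

def solution_alt (A : List Int) : Int :=
  let order := PySem.List.sorted (PySem.List.pyRange 0 (A.length : Int)) (fun i => PySem.List.pyGetD A i 0)
  let rank := rankLoop order 0 (List.replicate A.length 0)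
  let total := PySem.Int.floordiv (absSum rank 0) 2
  if total > 1000000000 then -1 else total

-- ===== PRECONDITION & SPEC =====
def Spec_solution (A : List Int) (out : Int) : Prop := out = solution_alt A
instance (A : List Int) (out : Int) : Decidable (Spec_solution A out) := by unfold Spec_solution; infer_instance

-- ===== CLAIM (what is proved, stated in full; the proofs are below) =====
def Claim_equal_solution : Prop := ∀ (A : List Int), Dom_solution A → Spec_solution A (solution A)

-- ===== LEMMAS AND PROOFS =====

-- the positive-displacement sum A's loop accumulates
def posSum : List Int → Int → Int
  | [], _ => 0
  | o :: rest, i => max 0 (i - o) + posSum rest (i + 1)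

theorem posSum_nonneg : ∀ (l : List Int) (i : Int), 0 ≤ posSum l i
  | [], _ => le_refl 0
  | o :: rest, i => by
    have := posSum_nonneg rest (i + 1)
    simp only [posSum]; omega

-- A's loop with its early exit equals the final sum tested once against the cap
theorem solLoopA_eq : ∀ (l : List Int) (idx inv : Int), inv ≤ 1000000000 →
    solLoopA l idx inv = if 1000000000 < inv + posSum l idx then -1 else inv + posSum l idx
  | [], idx, inv, h => by simp only [solLoopA, posSum]; rw [if_neg (by omega)]; ring
  | o :: rest, idx, inv, h => by
    have hp := posSum_nonneg rest (idx + 1)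
    simp only [solLoopA, posSum]
    by_cases ho : o < idx
    · rw [if_pos ho]
      by_cases hc : 1000000000 < inv + (idx - o)
      · rw [if_pos hc, if_pos (by omega)]
      · rw [if_neg hc, solLoopA_eq rest (idx + 1) (inv + (idx - o)) (by omega)]
        have : max 0 (idx - o) = idx - o := by omega
        rw [this]; ring_nf
    · rw [if_neg ho, solLoopA_eq rest (idx + 1) inv h]
      have : max 0 (idx - o) = 0 := by omega
      rw [this]; ring_nf

theorem posSum_eq : ∀ (l : List Int) (i : Int),
    posSum l i = ∑ j ∈ Finset.range l.length, max 0 (i + (j : Int) - l.getD j 0)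
  | [], _ => by simp [posSum]
  | o :: rest, i => by
    rw [List.length_cons, Finset.sum_range_succ']
    simp only [List.getD_cons_succ, List.getD_cons_zero, Nat.cast_zero, Nat.cast_add, Nat.cast_one]
    rw [posSum, posSum_eq rest (i + 1)]
    have : ∀ j ∈ Finset.range rest.length,
        max 0 (i + 1 + (j : Int) - rest.getD j 0) = max 0 (i + ((j : Int) + 1) - rest.getD j 0) := by
      intro j _; ring_nf
    rw [Finset.sum_congr rfl this]; ring_nf

theorem absSum_eq : ∀ (l : List Int) (i : Int),
    absSum l i = ∑ j ∈ Finset.range l.length, |i + (j : Int) - l.getD j 0|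
  | [], _ => by simp [absSum]
  | r :: rest, i => by
    rw [List.length_cons, Finset.sum_range_succ']
    simp only [List.getD_cons_succ, List.getD_cons_zero, Nat.cast_zero, Nat.cast_add, Nat.cast_one]
    rw [absSum, absSum_eq rest (i + 1)]
    have : ∀ j ∈ Finset.range rest.length,
        |i + 1 + (j : Int) - rest.getD j 0| = |i + ((j : Int) + 1) - rest.getD j 0| := by
      intro j _; ring_nf
    rw [Finset.sum_congr rfl this]; ring_nf

theorem rankLoop_length : ∀ (l : List Int) (i : Int) (r : List Int),
    (rankLoop l i r).length = r.length
  | [], _, _ => rfl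
  | p :: rest, i, r => by
    rw [rankLoop, rankLoop_length rest (i + 1) (r.set p.toNat i), List.length_set]

theorem rankLoop_get_notmem : ∀ (l : List Int) (i : Int) (r : List Int) (q : Nat),
    (∀ p ∈ l, p.toNat ≠ q) → (rankLoop l i r).getD q 0 = r.getD q 0
  | [], _, _, _, _ => rfl
  | p :: rest, i, r, q, h => by
    rw [rankLoop, rankLoop_get_notmem rest (i + 1) _ q (fun p hp => h p (List.mem_cons_of_mem _ hp))]
    simp only [List.getD, List.getElem?_set]
    rw [if_neg (h p (List.mem_cons_self))]

theorem rankLoop_get : ∀ (l : List Int) (i : Int) (r : List Int) (j : Nat),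
    j < l.length → l.Nodup → (∀ p ∈ l, 0 ≤ p ∧ p.toNat < r.length) →
    (rankLoop l i r).getD (l.getD j 0).toNat 0 = i + (j : Int)
  | [], _, _, j, hj, _, _ => absurd hj (by simp)
  | p :: rest, i, r, 0, _, hnd, hb => by
    rw [rankLoop, List.getD_cons_zero]
    have hp := hb p List.mem_cons_self
    have hnm : ∀ q ∈ rest, q.toNat ≠ p.toNat := by
      intro q hq hqe
      have hq' := hb q (List.mem_cons_of_mem _ hq)
      have : q = p := by omega
      exact (List.nodup_cons.mp hnd).1 (this ▸ hq)
    rw [rankLoop_get_notmem rest (i + 1) _ p.toNat hnm]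
    simp only [List.getD, List.getElem?_set, if_pos hp.2]
    simp
  | p :: rest, i, r, j + 1, hj, hnd, hb => by
    rw [rankLoop, List.getD_cons_succ]
    rw [rankLoop_get rest (i + 1) (r.set p.toNat i) j
      (by simpa using Nat.lt_of_succ_lt_succ hj) (List.nodup_cons.mp hnd).2
      (by intro q hq; have := hb q (List.mem_cons_of_mem _ hq); simpa [List.length_set] using this)]
    push_cast; ring

theorem sum_getD (l : List Int) : ∑ j ∈ Finset.range l.length, l.getD j 0 = l.sum := by
  induction l with
  | nil => simp
  | cons x xs ih =>
    rw [List.length_cons, Finset.sum_range_succ']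
    simp only [List.getD_cons_succ, List.getD_cons_zero]
    rw [ih, List.sum_cons, add_comm]

-- ===== VERDICT (by name: the statement is the Claim_ definition above) =====
theorem solution_spec : Claim_equal_solution := by
  intro A _
  unfold Spec_solution
  set n := A.length with hn
  set key : Int → Int := fun i => PySem.List.pyGetD A i 0 with hkey
  set s := PySem.List.sorted (PySem.List.pyRange 0 (n : Int)) key with hs
  -- s is a permutation of [0, 1, …, n-1]
  have hperm : s.Perm ((List.range n).map (fun k : Nat => (k : Int))) := by
    rw [hs, PySem.List.pyRange_zero_natCast]
    exact PySem.List.sorted_perm _ key false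
  have hslen : s.length = n := by simpa using hperm.length_eq
  have hmem : ∀ p ∈ s, 0 ≤ p ∧ p.toNat < n := by
    intro p hp
    have := hperm.mem_iff.mp hp
    simp only [List.mem_map, List.mem_range] at this
    obtain ⟨k, hk, rfl⟩ := this
    omega
  have hnodup : s.Nodup := by
    exact hperm.nodup_iff.mpr (List.Nodup.map Nat.cast_injective List.nodup_range)
  set rank := rankLoop s 0 (List.replicate n 0) with hrank
  have hrlen : rank.length = n := by rw [hrank, rankLoop_length]; simp
  have hget : ∀ j < n, rank.getD (s.getD j 0).toNat 0 = (j : Int) := by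
    intro j hj
    have := rankLoop_get s 0 (List.replicate n 0) j (by omega) hnodup
      (by intro p hp; simpa using hmem p hp)
    simpa using this
  have hsj_mem : ∀ j < n, s.getD j 0 ∈ s := by
    intro j hj
    rw [List.getD_eq_getElem _ _ (by omega)]
    exact List.getElem_mem _
  have hsur : ∀ i < n, ∃ j, j < n ∧ s.getD j 0 = (i : Int) := by
    intro i hi
    have hm : (i : Int) ∈ s := hperm.mem_iff.mpr (by
      simp only [List.mem_map, List.mem_range]; exact ⟨i, hi, rfl⟩)
    obtain ⟨j, hj, hje⟩ := List.getElem_of_mem hm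
    exact ⟨j, by omega, by rw [List.getD_eq_getElem _ _ hj]; exact hje⟩
  have hrv : ∀ i < n, (rank.getD i 0).toNat < n ∧ ((rank.getD i 0).toNat : Int) = rank.getD i 0 ∧
      s.getD (rank.getD i 0).toNat 0 = (i : Int) := by
    intro i hi
    obtain ⟨j, hj, hje⟩ := hsur i hi
    have hri : rank.getD i 0 = (j : Int) := by
      have := hget j hj
      rwa [hje, Int.toNat_natCast] at this
    rw [hri, Int.toNat_natCast]
    exact ⟨hj, rfl, hje⟩
  -- the two displacement sums agree (reindex by the permutation s)
  have hsum_eq : ∑ i ∈ Finset.range n, |(0 : Int) + (i : Int) - rank.getD i 0|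
      = ∑ j ∈ Finset.range n, |(j : Int) - s.getD j 0| := by
    refine Finset.sum_bij' (fun a _ => (rank.getD a 0).toNat) (fun a _ => (s.getD a 0).toNat)
      ?_ ?_ ?_ ?_ ?_
    · intro a ha
      exact Finset.mem_range.mpr (hrv a (Finset.mem_range.mp ha)).1
    · intro a ha
      have := hmem _ (hsj_mem a (Finset.mem_range.mp ha))
      exact Finset.mem_range.mpr this.2
    · intro a ha
      have h3 := (hrv a (Finset.mem_range.mp ha)).2.2
      dsimp only
      omega
    · intro a ha
      have := hget a (Finset.mem_range.mp ha)
      dsimp only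
      omega
    · intro a ha
      obtain ⟨h1, h2, h3⟩ := hrv a (Finset.mem_range.mp ha)
      dsimp only
      rw [h2, h3, abs_sub_comm]
      ring_nf
  -- the displacement sum over the permutation is zero
  have hzero : ∑ j ∈ Finset.range n, ((j : Int) - s.getD j 0) = 0 := by
    rw [Finset.sum_sub_distrib]
    have h1 : ∑ j ∈ Finset.range n, s.getD j 0 = s.sum := by
      have := sum_getD s; rwa [hslen] at this
    have h2 : s.sum = ∑ j ∈ Finset.range n, (j : Int) :=
      hperm.sum_eq.trans rfl
    omega
  -- absolute displacement = twice the positive displacement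
  have h2p : absSum rank 0 = 2 * posSum s 0 := by
    rw [absSum_eq, hrlen, hsum_eq, posSum_eq, hslen]
    have : ∀ j ∈ Finset.range n, |(j : Int) - s.getD j 0|
        = 2 * max 0 ((0 : Int) + (j : Int) - s.getD j 0) - ((j : Int) - s.getD j 0) := by
      intro j _
      have : (0 : Int) + (j : Int) = (j : Int) := by ring
      rw [this]
      rcases abs_cases ((j : Int) - s.getD j 0) with ⟨he, _⟩ | ⟨he, _⟩ <;> rw [he] <;> omega
    rw [Finset.sum_congr rfl this, Finset.sum_sub_distrib, hzero, Finset.mul_sum]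
    ring
  -- assemble both sides
  have hA : solution A = if 1000000000 < posSum s 0 then -1 else posSum s 0 := by
    rw [solution, ← hn, ← hkey, ← hs, solLoopA_eq s 0 0 (by norm_num)]
    simp only [zero_add]
  have htot : PySem.Int.floordiv (absSum rank 0) 2 = posSum s 0 := by
    rw [h2p, PySem.Int.floordiv_eq_ediv_of_pos (by norm_num : (0:Int) < 2),
      Int.mul_ediv_cancel_left _ (by norm_num)]
  have hB : solution_alt A = if posSum s 0 > 1000000000 then -1 else posSum s 0 := by
    rw [solution_alt, ← hn, ← hkey, ← hs, ← hrank]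
    simp only [htot]
  rw [hA, hB]
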